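-- pv_equiv track=rewrite | github.com/tinaf2/Fundamentals-of-AI-Assignments | hw1.py | MULT_DFS
-- ===== SOURCE A (Python) =====
-- def FINAL_STATE(S):
--     return S == (True, True, True, True)
--
-- def NEXT_STATE(S, A):
--     homer, baby, dog, poison = S
--     if A == 'b' and homer != baby: # cant move homer/baby if they are not on same side
--         return None
--     elif A == 'd' and homer != dog: # cant move homer/dog if they are not on same side
--         return None
--     elif A == 'p' and homer != poison: # cant move homer/poison if they are not on same side
--         return None
--     # initial check for bad move
--     elif A == 'h' and homer == baby and homer == dog: # if homer leaving baby unattended with dog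
--         return None
--     elif A == 'h' and homer == baby and homer == poison: # if homer leaving baby unattended with poison
--         return None
--     elif A == 'd' and baby == poison: # if homer/dog leaving baby/poison unattended
--         return None
--     elif A == 'p' and baby == dog: # if homer/poison leaving baby/dog unattended
--         return None
--
--
--
--     next_state = list(S) # initialize list representing new state
--     next_state[0] = not next_state[0] # homer is moving regardless
--     next_state[1] = baby
--     next_state[2] = dog
--     next_state[3] = poison
--
--     if A != 'h':
--         index = {'b': 1, 'd': 2, 'p': 3}[A]
--         next_state[index] = not next_state[index] # change index of any other thing moved with homer
--
--     if (next_state[1] == next_state[2] and next_state[0] != next_state[1]) or \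
--        (next_state[1] == next_state[3] and next_state[0] != next_state[1]):
--         return None # double check that baby/dog or baby/poison have not been left unattended without homer
--     return [tuple(next_state)]
--
-- def SUCC_FN(S):
--     successors = []
--     for move in ['h', 'b', 'd', 'p']:
--         next_state = NEXT_STATE(S, move) # try each possible move/operator on this state
--         if next_state:
--             successors.extend(next_state) # if that move produces valid state, add state to list of successors
--     return successors
--
-- def MULT_DFS(STATES, PATH):
--     if not STATES: # base case: if there are no states to explore, return None
--         return None
--     first_state = STATES[0]
--     if FINAL_STATE(first_state): # check if the first state is a final state
--         return PATH + [first_state]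
--     if first_state in PATH: # if we have encountered a cycle
--         return MULT_DFS(STATES[1:], PATH) # skip this state and continue with rest
--     res = MULT_DFS(SUCC_FN(first_state), PATH + [first_state]) # explore the successors of the first state recursively, adding the first state to the path
--     if res:
--         return res # if a solution is found in the subtree of this state, return the result
--     else:
--         return MULT_DFS(STATES[1:], PATH) # if no solution is found, backtrack and continue with the next state in the STATES list
-- ===== SOURCE B (Python) =====
-- def FINAL_STATE(S):
--     return S == (True, True, True, True)
--
-- def NEXT_STATE(S, A):
--     homer, baby, dog, poison = S
--     if A == 'b' and homer != baby:
--         return None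
--     elif A == 'd' and homer != dog:
--         return None
--     elif A == 'p' and homer != poison:
--         return None
--     elif A == 'h' and homer == baby and homer == dog:
--         return None
--     elif A == 'h' and homer == baby and homer == poison:
--         return None
--     elif A == 'd' and baby == poison:
--         return None
--     elif A == 'p' and baby == dog:
--         return None
--     next_state = list(S)
--     next_state[0] = not next_state[0]
--     if A != 'h':
--         index = {'b': 1, 'd': 2, 'p': 3}[A]
--         next_state[index] = not next_state[index]
--     if (next_state[1] == next_state[2] and next_state[0] != next_state[1]) or \
--        (next_state[1] == next_state[3] and next_state[0] != next_state[1]):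
--         return None
--     return [tuple(next_state)]
--
-- def SUCC_FN(S):
--     successors = []
--     for move in ['h', 'b', 'd', 'p']:
--         next_state = NEXT_STATE(S, move)
--         if next_state:
--             successors.extend(next_state)
--     return successors
--
-- def MULT_DFS(STATES, PATH):
--     # iterative DFS with an explicit stack of (state, path) entries
--     stack = [(s, PATH) for s in reversed(STATES)]
--     while stack:
--         state, path = stack.pop()
--         if FINAL_STATE(state):
--             return path + [state]
--         if state in path:
--             continue
--         new_path = path + [state]
--         for succ in reversed(SUCC_FN(state)):
--             stack.append((succ, new_path))
--     return None
-- ===== Notes on version B (the rewrite author's own statement) =====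
-- stated objective: alternative
-- what changed: Replaced the triple-recursive DFS (recursing on successors, on the tail, and on the truthiness of the subtree result) by an iterative DFS with an explicit stack of (state, path) entries popped in LIFO order.
import Mathlib
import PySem

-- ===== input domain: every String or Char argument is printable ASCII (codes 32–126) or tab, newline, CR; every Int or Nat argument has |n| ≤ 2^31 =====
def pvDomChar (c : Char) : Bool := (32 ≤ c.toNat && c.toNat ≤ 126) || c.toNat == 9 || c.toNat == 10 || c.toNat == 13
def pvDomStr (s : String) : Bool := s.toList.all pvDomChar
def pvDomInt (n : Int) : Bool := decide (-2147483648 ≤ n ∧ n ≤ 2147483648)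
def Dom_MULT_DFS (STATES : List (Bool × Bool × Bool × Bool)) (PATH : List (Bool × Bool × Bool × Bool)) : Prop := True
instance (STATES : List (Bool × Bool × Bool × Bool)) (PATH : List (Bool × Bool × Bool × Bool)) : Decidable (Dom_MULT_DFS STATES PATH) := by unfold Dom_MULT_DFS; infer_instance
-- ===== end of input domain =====

-- B re-implements MULT_DFS as an iterative DFS over an explicit (state, path) stack
-- (alternative decomposition, same exact result); helpers FINAL_STATE/NEXT_STATE/SUCC_FN are shared.

-- ===== PORT A =====
-- shared helpers (the module context of MULT_DFS)
def FINAL_STATE (S : Bool × Bool × Bool × Bool) : Bool :=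
  S == (true, true, true, true)

def NEXT_STATE (S : Bool × Bool × Bool × Bool) (A : Char) : Option (List (Bool × Bool × Bool × Bool)) :=
  let (homer, baby, dog, poison) := S
  if A = 'b' ∧ homer ≠ baby then none
  else if A = 'd' ∧ homer ≠ dog then none
  else if A = 'p' ∧ homer ≠ poison then none
  else if A = 'h' ∧ homer = baby ∧ homer = dog then none
  else if A = 'h' ∧ homer = baby ∧ homer = poison then none
  else if A = 'd' ∧ baby = poison then none
  else if A = 'p' ∧ baby = dog then none
  else
    let n0 : Bool := !homer
    -- {'b':1,'d':2,'p':3}[A]: toggle the indexed component; A is always one of 'h','b','d','p'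
    -- here (SUCC_FN only passes these), so the Python KeyError branch is unreachable
    let (n1, n2, n3) :=
      if A ≠ 'h' then
        if A = 'b' then (!baby, dog, poison)
        else if A = 'd' then (baby, !dog, poison)
        else (baby, dog, !poison)
      else (baby, dog, poison)
    if (n1 = n2 ∧ n0 ≠ n1) ∨ (n1 = n3 ∧ n0 ≠ n1) then none
    else some [(n0, n1, n2, n3)]

def SUCC_FN (S : Bool × Bool × Bool × Bool) : List (Bool × Bool × Bool × Bool) :=
  ['h', 'b', 'd', 'p'].foldl (fun successors move =>
    match NEXT_STATE S move with     -- Python: `if next_state:` (None and [] are falsy)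
    | none => successors
    | some l => if l.isEmpty then successors else successors ++ l) []

-- Python truthiness of `res` (None or a list): false for None and for []
def pyTruthyOpt {α : Type} (o : Option (List α)) : Bool :=
  match o with
  | none => false
  | some l => !l.isEmpty

-- termination helper for both ports, cited by the decreasing_by blocks
theorem pv_path_card_lt (s : Bool × Bool × Bool × Bool) (PATH : List (Bool × Bool × Bool × Bool))
    (h : s ∉ PATH) :
    16 - (PATH ++ [s]).toFinset.card < 16 - PATH.toFinset.card := by
  have h2 : s ∉ PATH.toFinset := by simpa using h
  have h1 : (PATH ++ [s]).toFinset = insert s PATH.toFinset := by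
    simp [List.toFinset_append]
  have h3 : (insert s PATH.toFinset).card = PATH.toFinset.card + 1 :=
    Finset.card_insert_of_notMem h2
  rw [h1]
  have h4 : (insert s PATH.toFinset).card ≤ 16 := by
    have hle := Finset.card_le_univ (insert s PATH.toFinset)
    have hcard : Fintype.card (Bool × Bool × Bool × Bool) = 16 := by simp
    omega
  omega

def MULT_DFS (STATES : List (Bool × Bool × Bool × Bool)) (PATH : List (Bool × Bool × Bool × Bool)) : Option (List (Bool × Bool × Bool × Bool)) :=
  match STATES with
  | [] => none
  | first_state :: restStates =>
    if FINAL_STATE first_state then some (PATH ++ [first_state])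
    else if first_state ∈ PATH then MULT_DFS restStates PATH
    else
      let res := MULT_DFS (SUCC_FN first_state) (PATH ++ [first_state])
      if pyTruthyOpt res then res else MULT_DFS restStates PATH
termination_by ((16 - PATH.toFinset.card : Nat), STATES.length)
decreasing_by
  · exact Prod.Lex.right _ (by simp)
  · exact Prod.Lex.left _ _ (pv_path_card_lt _ _ (by assumption))
  · exact Prod.Lex.right _ (by simp)

-- ===== PORT B =====
-- termination helpers for the stack loop, cited by its decreasing_by block
theorem pv_card_le_16 (p : List (Bool × Bool × Bool × Bool)) : p.toFinset.card ≤ 16 := by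
  have hle := Finset.card_le_univ p.toFinset
  have hcard : Fintype.card (Bool × Bool × Bool × Bool) = 16 := by simp
  omega

theorem pv_succ_len (s : Bool × Bool × Bool × Bool) : (SUCC_FN s).length ≤ 4 := by
  revert s; decide

def pvStackMeasure (stack : List ((Bool × Bool × Bool × Bool) × List (Bool × Bool × Bool × Bool))) : Nat :=
  (stack.map (fun e => 5 ^ (17 - e.2.toFinset.card))).sum

theorem pv_stack_pop (s : Bool × Bool × Bool × Bool)
    (p : List (Bool × Bool × Bool × Bool))
    (rest : List ((Bool × Bool × Bool × Bool) × List (Bool × Bool × Bool × Bool))) :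
    pvStackMeasure rest < pvStackMeasure ((s, p) :: rest) := by
  simp [pvStackMeasure]

theorem pv_stack_push (s : Bool × Bool × Bool × Bool)
    (p : List (Bool × Bool × Bool × Bool)) (h : s ∉ p)
    (rest : List ((Bool × Bool × Bool × Bool) × List (Bool × Bool × Bool × Bool))) :
    pvStackMeasure ((SUCC_FN s).map (fun t => (t, p ++ [s])) ++ rest)
      < pvStackMeasure ((s, p) :: rest) := by
  have hcard : (p ++ [s]).toFinset.card = p.toFinset.card + 1 := by
    have h2 : s ∉ p.toFinset := by simpa using h
    simp [List.toFinset_append, Finset.card_insert_of_notMem h2]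
  have hle : p.toFinset.card ≤ 16 := pv_card_le_16 p
  have hm : pvStackMeasure ((SUCC_FN s).map (fun t => (t, p ++ [s])))
      = (SUCC_FN s).length * 5 ^ (17 - (p ++ [s]).toFinset.card) := by
    simp [pvStackMeasure, List.map_map, Function.comp_def, List.sum_replicate,
      List.map_const']
  have hlen : (SUCC_FN s).length ≤ 4 := pv_succ_len s
  have hsplit : pvStackMeasure ((SUCC_FN s).map (fun t => (t, p ++ [s])) ++ rest)
      = pvStackMeasure ((SUCC_FN s).map (fun t => (t, p ++ [s]))) + pvStackMeasure rest := by
    simp [pvStackMeasure]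
  have hexp : 5 ^ (17 - p.toFinset.card) = 5 * 5 ^ (17 - (p ++ [s]).toFinset.card) := by
    rw [hcard, ← pow_succ']
    congr 1
    omega
  have hpos : 0 < 5 ^ (17 - (p ++ [s]).toFinset.card) := Nat.pow_pos (by norm_num)
  have hbound : pvStackMeasure ((SUCC_FN s).map (fun t => (t, p ++ [s])))
      ≤ 4 * 5 ^ (17 - (p ++ [s]).toFinset.card) := by
    rw [hm]; exact Nat.mul_le_mul_right _ hlen
  simp only [pvStackMeasure, List.map_cons, List.sum_cons] at *
  omega

-- the explicit-stack DFS loop of Source B: each entry is (state, its own path)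
def pvDfsStack (stack : List ((Bool × Bool × Bool × Bool) × List (Bool × Bool × Bool × Bool))) : Option (List (Bool × Bool × Bool × Bool)) :=
  match stack with
  | [] => none
  | (state, path) :: rest =>
    if FINAL_STATE state then some (path ++ [state])
    else if state ∈ path then pvDfsStack rest
    else pvDfsStack ((SUCC_FN state).map (fun succ => (succ, path ++ [state])) ++ rest)
termination_by pvStackMeasure stack
decreasing_by
  · exact pv_stack_pop _ _ _
  · exact pv_stack_push _ _ (by assumption) _

def MULT_DFS_alt (STATES : List (Bool × Bool × Bool × Bool)) (PATH : List (Bool × Bool × Bool × Bool)) : Option (List (Bool × Bool × Bool × Bool)) :=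
  pvDfsStack (STATES.map (fun s => (s, PATH)))

-- ===== PRECONDITION & SPEC =====
def Spec_MULT_DFS (STATES : List (Bool × Bool × Bool × Bool)) (PATH : List (Bool × Bool × Bool × Bool)) (out : Option (List (Bool × Bool × Bool × Bool))) : Prop := out = MULT_DFS_alt STATES PATH
instance (STATES : List (Bool × Bool × Bool × Bool)) (PATH : List (Bool × Bool × Bool × Bool)) (out : Option (List (Bool × Bool × Bool × Bool))) : Decidable (Spec_MULT_DFS STATES PATH out) := by unfold Spec_MULT_DFS; infer_instance

-- ===== CLAIM (what is proved, stated in full; the proofs are below) =====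
def Claim_equal_MULT_DFS : Prop := ∀ (STATES : List (Bool × Bool × Bool × Bool)) (PATH : List (Bool × Bool × Bool × Bool)), Dom_MULT_DFS STATES PATH → Spec_MULT_DFS STATES PATH (MULT_DFS STATES PATH)

-- ===== LEMMAS AND PROOFS =====

-- A never returns `some []` (a returned path always ends with the final state)
theorem MULT_DFS_ne_nil (STATES PATH : List (Bool × Bool × Bool × Bool)) :
    ∀ r, MULT_DFS STATES PATH = some r → r ≠ [] := by
  induction STATES, PATH using MULT_DFS.induct with
  | case1 PATH => intro r hr; simp [MULT_DFS] at hr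
  | case2 PATH s rest hf =>
      intro r hr
      rw [MULT_DFS, if_pos hf] at hr
      cases hr
      simp
  | case3 PATH s rest hf hmem ih =>
      intro r hr
      rw [MULT_DFS, if_neg hf, if_pos hmem] at hr
      exact ih r hr
  | case4 PATH s rest hf hmem res ht ih =>
      intro r hr
      have ht' : pyTruthyOpt (MULT_DFS (SUCC_FN s) (PATH ++ [s])) = true := ht
      rw [MULT_DFS, if_neg hf, if_neg hmem, if_pos ht'] at hr
      cases hres : MULT_DFS (SUCC_FN s) (PATH ++ [s]) with
      | none => rw [hres] at ht'; simp [pyTruthyOpt] at ht'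
      | some l =>
          rw [hres] at hr ht'
          cases hr
          simp only [pyTruthyOpt, Bool.not_eq_eq_eq_not] at ht'
          simpa using ht'
  | case5 PATH s rest hf hmem res ht ih1 ih2 =>
      intro r hr
      have ht' : ¬ pyTruthyOpt (MULT_DFS (SUCC_FN s) (PATH ++ [s])) = true := ht
      rw [MULT_DFS, if_neg hf, if_neg hmem, if_neg ht'] at hr
      exact ih2 r hr

-- the stack loop simulates A's recursion: running it on STATES (each paired with PATH)
-- atop any remaining stack `rest` yields A's result there, falling through to `rest` on failure
theorem dfsStack_eq (STATES PATH : List (Bool × Bool × Bool × Bool)) :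
    ∀ rest, pvDfsStack (STATES.map (fun s => (s, PATH)) ++ rest)
      = match MULT_DFS STATES PATH with
        | some r => some r
        | none => pvDfsStack rest := by
  induction STATES, PATH using MULT_DFS.induct with
  | case1 PATH => intro rest; simp [MULT_DFS]
  | case2 PATH s rest' hf =>
      intro rest
      rw [MULT_DFS, if_pos hf]
      simp only [List.map_cons, List.cons_append]
      rw [pvDfsStack, if_pos hf]
  | case3 PATH s rest' hf hmem ih =>
      intro rest
      rw [MULT_DFS, if_neg hf, if_pos hmem]
      simp only [List.map_cons, List.cons_append]
      rw [pvDfsStack, if_neg hf, if_pos hmem]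
      exact ih rest
  | case4 PATH s rest' hf hmem res ht ih =>
      intro rest
      have ht' : pyTruthyOpt (MULT_DFS (SUCC_FN s) (PATH ++ [s])) = true := ht
      rw [MULT_DFS, if_neg hf, if_neg hmem, if_pos ht']
      simp only [List.map_cons, List.cons_append]
      rw [pvDfsStack, if_neg hf, if_neg hmem]
      rw [ih]
      cases hres : MULT_DFS (SUCC_FN s) (PATH ++ [s]) with
      | none => rw [hres] at ht'; simp [pyTruthyOpt] at ht'
      | some l => simp
  | case5 PATH s rest' hf hmem res ht ih1 ih2 =>
      intro rest
      have ht' : ¬ pyTruthyOpt (MULT_DFS (SUCC_FN s) (PATH ++ [s])) = true := ht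
      rw [MULT_DFS, if_neg hf, if_neg hmem, if_neg ht']
      simp only [List.map_cons, List.cons_append]
      rw [pvDfsStack, if_neg hf, if_neg hmem]
      rw [ih1]
      cases hres : MULT_DFS (SUCC_FN s) (PATH ++ [s]) with
      | none => exact ih2 rest
      | some l =>
          have hl : l ≠ [] := MULT_DFS_ne_nil _ _ l hres
          rw [hres] at ht'
          simp [pyTruthyOpt, hl] at ht'

-- ===== VERDICT (by name: the statement is the Claim_ definition above) =====
theorem MULT_DFS_spec : Claim_equal_MULT_DFS := by
  intro STATES PATH _
  unfold Spec_MULT_DFS MULT_DFS_alt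
  have h := dfsStack_eq STATES PATH []
  rw [List.append_nil] at h
  rw [h]
  cases MULT_DFS STATES PATH <;> simp [pvDfsStack]
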